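-- pv_equiv track=rewrite | github.com/shubhrangipathak/LeetCode | 2645-minimum-additions-to-make-valid-string/2645-minimum-additions-to-make-valid-string.py | addMinimum
-- ===== SOURCE A (Python) =====
-- def addMinimum(word: str) -> int:
--
--     if len(word) == 0:
--         return 0
--
--     expected = 'a'
--     count = 0
--     i = 0
--
--     while i < len(word):
--         curr = word[i]
--
--         if expected == 'a':
--             if curr != 'a':
--                 count+=1
--
--             else:
--                 i += 1
--             expected = 'b'
--
--         elif expected == 'b':
--             if curr != 'b':
--                 count += 1
--             else:
--                 i += 1
--             expected = 'c'
--
--         elif expected == 'c':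
--             if curr != 'c':
--                 count += 1
--             else:
--                 i += 1
--             expected = 'a'
--
--     if curr == 'a':
--         count += 2
--     elif curr == 'b':
--         count += 1
--
--     return count
-- ===== SOURCE B (Python) =====
-- def addMinimum(word: str) -> int:
--     if not word:
--         return 0
--     groups = 1 + sum(1 for p, c in zip(word, word[1:]) if c <= p)
--     return 3 * groups - len(word)
-- ===== Notes on version B (the rewrite author's own statement) =====
-- stated objective: simpler
-- what changed: Replaces A's expected-letter state-machine simulation (which revisits each position up to three times) with one adjacent-comparison pass counting 'abc' blocks and the closed form 3*groups - len(word).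
import Mathlib
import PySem

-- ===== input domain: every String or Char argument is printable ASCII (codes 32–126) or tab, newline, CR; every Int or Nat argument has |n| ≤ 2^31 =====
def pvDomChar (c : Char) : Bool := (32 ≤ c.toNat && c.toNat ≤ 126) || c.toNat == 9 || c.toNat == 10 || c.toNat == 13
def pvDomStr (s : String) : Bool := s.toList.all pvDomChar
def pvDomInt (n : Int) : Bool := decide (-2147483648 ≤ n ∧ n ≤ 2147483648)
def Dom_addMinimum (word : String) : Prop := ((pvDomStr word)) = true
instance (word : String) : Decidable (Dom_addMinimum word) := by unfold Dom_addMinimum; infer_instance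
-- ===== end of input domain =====

-- B replaces A's expected-letter state machine with one adjacent-comparison pass counting
-- blocks plus the closed form 3*groups - len (objective: simpler; same O(n) cost).

-- ===== PORT A =====
-- A's while-loop: state = remaining chars, expected letter, count, curr (last read char).
-- The fuel argument only makes the loop total in Lean; on inputs satisfying Pre_ (all chars
-- in 'abc') the supplied fuel 3*len+1 is proved sufficient, so the 0-fuel branch never decides
-- the result there.
def aLoop (fuel : Nat) (l : List Char) (expected : Char) (count : Int) (curr : Char) :
    Int × Char :=
  match fuel with
  | 0 => (count, curr)
  | fuel + 1 =>
    match l with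
    | [] => (count, curr)
    | c :: rest =>
      if expected = 'a' then
        if c ≠ 'a' then aLoop fuel (c :: rest) 'b' (count + 1) c
        else aLoop fuel rest 'b' count c
      else if expected = 'b' then
        if c ≠ 'b' then aLoop fuel (c :: rest) 'c' (count + 1) c
        else aLoop fuel rest 'c' count c
      else if expected = 'c' then
        if c ≠ 'c' then aLoop fuel (c :: rest) 'a' (count + 1) c
        else aLoop fuel rest 'a' count c
      else (count, curr) -- unreachable: expected is always one of 'a','b','c'

def addMinimum (word : String) : Int :=
  if word.toList.length = 0 then 0
  else
    match aLoop (3 * word.toList.length + 1) word.toList 'a' 0 'a' with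
    | (count, curr) =>
      if curr = 'a' then count + 2
      else if curr = 'b' then count + 1
      else count

-- ===== PORT B =====
def addMinimum_alt (word : String) : Int :=
  match word.toList with
  | [] => 0
  | c :: rest =>
    let groups : Int := 1 + (((c :: rest).zip rest).countP (fun q => decide (q.2 ≤ q.1)) : Nat)
    3 * groups - (c :: rest).length

-- ===== PRECONDITION & SPEC =====
-- Pre_ excludes strings containing a character other than 'a','b','c': on those Python A's
-- while loop never advances past that character, so A diverges and returns no value.
def Pre_addMinimum (word : String) : Prop :=
  (word.toList.all fun c => c == 'a' || (c == 'b' || c == 'c')) = true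
instance (word : String) : Decidable (Pre_addMinimum word) := by
  unfold Pre_addMinimum; infer_instance

def pvWitness_addMinimum : String := "abcacab"

def Spec_addMinimum (word : String) (out : Int) : Prop := out = addMinimum_alt word
instance (word : String) (out : Int) : Decidable (Spec_addMinimum word out) := by
  unfold Spec_addMinimum; infer_instance

-- ===== CLAIM (what is proved, stated in full; the proofs are below) =====
def Claim_equal_addMinimum : Prop :=
  ∀ (word : String), Dom_addMinimum word → Pre_addMinimum word →
    Spec_addMinimum word (addMinimum word)

-- ===== LEMMAS AND PROOFS =====

-- letter value a↦0, b↦1, c↦2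
def chv (c : Char) : Int := if c = 'a' then 0 else if c = 'b' then 1 else 2
-- letter expected after consuming c
def nxt (c : Char) : Char := if c = 'a' then 'b' else if c = 'b' then 'c' else 'a'
-- total number of count-increments A's loop performs when started expecting e on list l
def cost (e : Char) (l : List Char) : Int :=
  match l with
  | [] => 0
  | c :: rest => (chv c - chv e) % 3 + cost (nxt c) rest
-- number of adjacent non-increasing pairs in p :: l
def cnt (p : Char) (l : List Char) : Int :=
  match l with
  | [] => 0
  | c :: rest => (if c ≤ p then 1 else 0) + cnt c rest

theorem getLastD_mem_cons' (l : List Char) : ∀ (a : Char), l.getLastD a ∈ a :: l := by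
  induction l with
  | nil => intro a; simp
  | cons d t ih =>
    intro a
    have := ih d
    simp only [List.getLastD_cons]
    simp only [List.mem_cons] at this ⊢
    tauto

theorem aLoop_spec (l : List Char) :
    ∀ (e : Char) (fuel : Nat) (count : Int) (curr : Char),
      (∀ c ∈ l, c = 'a' ∨ c = 'b' ∨ c = 'c') →
      (e = 'a' ∨ e = 'b' ∨ e = 'c') →
      3 * l.length ≤ fuel →
      aLoop fuel l e count curr = (count + cost e l, l.getLastD curr) := by
  induction l with
  | nil =>
    intro e fuel count curr _ _ _
    cases fuel <;> simp [aLoop, cost]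
  | cons c rest ih =>
    intro e fuel count curr hmem he hfuel
    simp only [List.length_cons] at hfuel
    obtain ⟨k, rfl⟩ : ∃ k, fuel = k + 3 := ⟨fuel - 3, by omega⟩
    have hc : c = 'a' ∨ c = 'b' ∨ c = 'c' := hmem c (by simp)
    have hrest : ∀ x ∈ rest, x = 'a' ∨ x = 'b' ∨ x = 'c' := fun x hx => hmem x (by simp [hx])
    rcases he with rfl | rfl | rfl <;> rcases hc with rfl | rfl | rfl
    · exact Eq.trans (ih 'b' (k+2) count 'a' hrest (Or.inr (Or.inl rfl)) (by omega))
        (by rw [List.getLastD_cons]; simp [cost, chv, nxt]; try omega; try ring)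
    · exact Eq.trans (ih 'c' (k+1) (count+1) 'b' hrest (Or.inr (Or.inr rfl)) (by omega))
        (by rw [List.getLastD_cons]; simp [cost, chv, nxt]; try omega; try ring)
    · exact Eq.trans (ih 'a' k (count+1+1) 'c' hrest (Or.inl rfl) (by omega))
        (by rw [List.getLastD_cons]; simp [cost, chv, nxt]; try omega; try ring)
    · exact Eq.trans (ih 'b' k (count+1+1) 'a' hrest (Or.inr (Or.inl rfl)) (by omega))
        (by rw [List.getLastD_cons]; simp [cost, chv, nxt]; try omega; try ring)
    · exact Eq.trans (ih 'c' (k+2) count 'b' hrest (Or.inr (Or.inr rfl)) (by omega))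
        (by rw [List.getLastD_cons]; simp [cost, chv, nxt]; try omega; try ring)
    · exact Eq.trans (ih 'a' (k+1) (count+1) 'c' hrest (Or.inl rfl) (by omega))
        (by rw [List.getLastD_cons]; simp [cost, chv, nxt]; try omega; try ring)
    · exact Eq.trans (ih 'b' (k+1) (count+1) 'a' hrest (Or.inr (Or.inl rfl)) (by omega))
        (by rw [List.getLastD_cons]; simp [cost, chv, nxt]; try omega; try ring)
    · exact Eq.trans (ih 'c' k (count+1+1) 'b' hrest (Or.inr (Or.inr rfl)) (by omega))
        (by rw [List.getLastD_cons]; simp [cost, chv, nxt]; try omega; try ring)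
    · exact Eq.trans (ih 'a' (k+2) count 'c' hrest (Or.inl rfl) (by omega))
        (by rw [List.getLastD_cons]; simp [cost, chv, nxt]; try omega; try ring)

-- telescoping: cost from nxt p plus the final padding equals 3*(blocks after p) - len
theorem cost_telescope (l : List Char) :
    ∀ (p : Char),
      (∀ c ∈ l, c = 'a' ∨ c = 'b' ∨ c = 'c') →
      (p = 'a' ∨ p = 'b' ∨ p = 'c') →
      cost (nxt p) l + (2 - chv (l.getLastD p)) = 3 * cnt p l - l.length + (2 - chv p) := by
  induction l with
  | nil => intro p _ _; simp [cost, cnt]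
  | cons c rest ih =>
    intro p hmem hp
    have hc : c = 'a' ∨ c = 'b' ∨ c = 'c' := hmem c (by simp)
    have hrest : ∀ x ∈ rest, x = 'a' ∨ x = 'b' ∨ x = 'c' := fun x hx => hmem x (by simp [hx])
    have hstep : (chv c - chv (nxt p)) % 3 = chv c - chv p - 1 + (if c ≤ p then 3 else 0) := by
      rcases hp with rfl | rfl | rfl <;> rcases hc with rfl | rfl | rfl <;> decide
    have ht := ih c hrest hc
    simp only [cost, cnt, List.getLastD_cons, List.length_cons]
    rw [hstep]
    push_cast
    split_ifs with h
    · linarith [ht]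
    · linarith [ht]

theorem cnt_eq_countP (l : List Char) :
    ∀ (p : Char),
      cnt p l = (((p :: l).zip l).countP (fun q => decide (q.2 ≤ q.1)) : Nat) := by
  induction l with
  | nil => intro p; simp [cnt]
  | cons c rest ih =>
    intro p
    simp only [cnt, List.zip_cons_cons, List.countP_cons, ih c]
    simp only [decide_eq_true_eq]
    split_ifs with h <;> push_cast <;> ring

-- ===== VERDICT (by name: the statement is the Claim_ definition above) =====
theorem addMinimum_spec : Claim_equal_addMinimum := by
  intro word _ hpre0
  have hpre : ∀ c ∈ word.toList, c = 'a' ∨ c = 'b' ∨ c = 'c' := by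
    unfold Pre_addMinimum at hpre0
    simp only [List.all_eq_true, Bool.or_eq_true, beq_iff_eq] at hpre0
    exact hpre0
  unfold Spec_addMinimum addMinimum addMinimum_alt
  cases hl : word.toList with
  | nil => simp
  | cons c rest =>
    have hmem : ∀ x ∈ c :: rest, x = 'a' ∨ x = 'b' ∨ x = 'c' := fun x hx => hpre x (hl ▸ hx)
    have hc : c = 'a' ∨ c = 'b' ∨ c = 'c' := hmem c (by simp)
    have hrest : ∀ x ∈ rest, x = 'a' ∨ x = 'b' ∨ x = 'c' := fun x hx => hmem x (by simp [hx])
    rw [if_neg (by simp)]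
    rw [aLoop_spec (c :: rest) 'a' _ 0 'a' hmem (by simp) (by omega)]
    have hz := hmem _ (getLastD_mem_cons' rest c)
    have htel := cost_telescope rest c hrest hc
    rw [cnt_eq_countP rest c] at htel
    have hcost : cost 'a' (c :: rest) = chv c + cost (nxt c) rest := by
      have h0 : (chv c - chv 'a') % 3 = chv c := by
        rcases hc with rfl | rfl | rfl <;> decide
      simp [cost, h0]
    simp only [List.getLastD_cons]
    rcases hz with h | h | h <;>
      rw [h] <;>
      rw [h] at htel <;>
      simp only [Char.reduceEq, if_true, if_false, reduceIte, hcost] <;>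
      norm_num [chv] at htel ⊢ <;>
      push_cast [List.length_cons] at htel ⊢ <;>
      omega
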